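-- pv_equiv track=rewrite | github.com/usard/Data-structures-and-algo | check.py | freq_characters
-- ===== SOURCE A (Python) =====
-- def freq_characters(strng):
--     freq=''
--     increment=1
--     for i in range(0,len(strng), increment): # you cannot dynamically update increment value from inside
--         count=1
--         for j in range(i+1, len(strng)):
--             if strng[i] == strng[j]:
--                 count+=1
--         freq = freq+strng[i]+str(count)
--         increment=count
--     return freq
-- ===== SOURCE B (Python) =====
-- def freq_characters(strng):
--     # One backward pass: running per-character counts give, at each position,
--     # the number of occurrences of that character in the suffix starting there.
--     counts = {}
--     parts = []
--     for ch in reversed(strng):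
--         c = counts.get(ch, 0) + 1
--         counts[ch] = c
--         parts.append(ch + str(c))
--     return ''.join(reversed(parts))
-- ===== Notes on version B (the rewrite author's own statement) =====
-- stated objective: faster
-- what changed: Replaced the nested suffix-scan per position with a single backward pass that maintains per-character running counts in a dict and joins the pieces built back-to-front.
import Mathlib
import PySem

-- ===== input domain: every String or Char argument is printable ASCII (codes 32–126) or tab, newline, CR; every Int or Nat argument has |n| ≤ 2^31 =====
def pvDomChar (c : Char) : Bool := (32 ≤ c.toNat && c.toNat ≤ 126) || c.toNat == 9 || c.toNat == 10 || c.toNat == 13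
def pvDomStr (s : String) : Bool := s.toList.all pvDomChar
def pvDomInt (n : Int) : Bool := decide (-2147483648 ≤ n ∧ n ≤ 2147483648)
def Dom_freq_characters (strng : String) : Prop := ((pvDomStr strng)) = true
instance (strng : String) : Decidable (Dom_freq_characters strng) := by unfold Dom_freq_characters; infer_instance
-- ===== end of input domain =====

-- B replaces A's per-position suffix rescan by one backward pass with a dict of
-- running per-character counts (objective: faster, asymptotic O(n) vs O(n^2)).

-- ===== PORT A =====
-- inner loop: count = 1; for j in range(i+1, len(strng)): if strng[i]==strng[j]: count += 1
def pvCntA (cs : List Char) (i : Int) : Int :=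
  (PySem.List.pyRange (i + 1) (cs.length : Int) 1).foldl
    (fun count j =>
      if PySem.List.pyGetD cs i ' ' == PySem.List.pyGetD cs j ' ' then count + 1 else count) 1

-- one iteration of A's outer loop; state = (freq, increment)
def pvStepA (cs : List Char) (st : List Char × Int) (i : Int) : List Char × Int :=
  let count := pvCntA cs i
  (st.1 ++ [PySem.List.pyGetD cs i ' '] ++ (PySem.Int.toStr count).toList, count)

def freq_characters (strng : String) : String :=
  String.ofList (((PySem.List.pyRange 0 (strng.toList.length : Int) 1).foldl
    (pvStepA strng.toList) ([], 1)).1)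

-- ===== PORT B =====
-- one iteration of B's loop over reversed(strng); state = (counts, parts)
def pvStepB (st : PySem.Dict Char Int × List (List Char)) (ch : Char) :
    PySem.Dict Char Int × List (List Char) :=
  let c : Int := st.1.getD ch 0 + 1
  (st.1.insert ch c, st.2 ++ [ch :: (PySem.Int.toStr c).toList])

def freq_characters_alt (strng : String) : String :=
  String.ofList ((strng.toList.reverse.foldl pvStepB (PySem.Dict.empty, [])).2.reverse.flatten)

-- ===== PRECONDITION & SPEC =====
def Spec_freq_characters (strng : String) (out : String) : Prop := out = freq_characters_alt strng
instance (strng : String) (out : String) : Decidable (Spec_freq_characters strng out) := by unfold Spec_freq_characters; infer_instance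

-- ===== CLAIM (what is proved, stated in full; the proofs are below) =====
def Claim_equal_freq_characters : Prop := ∀ (strng : String), Dom_freq_characters strng → Spec_freq_characters strng (freq_characters strng)

-- ===== LEMMAS AND PROOFS =====

-- canonical value: for each position, the character followed by str(count of it in the suffix)
def pvPieces : List Char → List (List Char)
  | [] => []
  | c :: t => (c :: (PySem.Int.toStr ((t.count c : Int) + 1)).toList) :: pvPieces t

-- counting equal chars over Nat indices of l is l.count
theorem pv_countP_range_getD (l : List Char) (c : Char) :
    (List.range l.length).countP (fun m => c == l.getD m ' ') = l.count c := by
  induction l with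
  | nil => simp
  | cons x t ih =>
    simp only [List.length_cons, List.range_succ_eq_map, List.countP_cons, List.countP_map,
      Function.comp_def, List.getD_cons_succ, List.getD_cons_zero, List.count_cons, ih]
    rcases eq_or_ne c x with h | h
    · subst h; simp
    · simp [h, Ne.symm h]

-- A's inner loop computes 1 + (count of cs[k] in the suffix after k)
theorem pv_cntA_eq (cs : List Char) (k : Nat) (hk : k < cs.length) :
    pvCntA cs (k : Int) = ((cs.drop (k + 1)).count (cs.getD k ' ') : Int) + 1 := by
  unfold pvCntA
  rw [PySem.List.foldl_if_add_one
    (p := fun j => PySem.List.pyGetD cs (k : Int) ' ' == PySem.List.pyGetD cs j ' ')]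
  rw [PySem.List.pyRange_one]
  rw [List.countP_map]
  have hlen : ((cs.length : Int) - ((k : Int) + 1)).toNat = (cs.drop (k + 1)).length := by
    simp [List.length_drop]; omega
  rw [hlen]
  have hcong : ∀ m ∈ List.range (cs.drop (k + 1)).length,
      ((fun j => PySem.List.pyGetD cs (k : Int) ' ' == PySem.List.pyGetD cs j ' ') ∘
        (fun m : Nat => (k : Int) + 1 + (m : Int))) m
      = (fun m => cs.getD k ' ' == (cs.drop (k + 1)).getD m ' ') m := by
    intro m hm
    simp only [List.mem_range, List.length_drop] at hm
    simp only [Function.comp_apply]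
    have h1 : (k : Int) + 1 + (m : Int) = ((k + 1 + m : Nat) : Int) := by push_cast; ring
    rw [h1, PySem.List.pyGetD_natCast, PySem.List.pyGetD_natCast]
    congr 1
    rw [List.getD_eq_getElem?_getD, List.getD_eq_getElem?_getD, List.getElem?_drop]
  rw [List.countP_congr (fun m hm => by rw [hcong m hm]), pv_countP_range_getD]
  omega

-- A's outer loop, unrolled: freq is the concatenation of the per-index pieces
theorem pv_foldA (cs : List Char) (l : List Int) :
    ∀ (acc : List Char) (inc : Int),
      (l.foldl (pvStepA cs) (acc, inc)).1
        = acc ++ l.flatMap (fun i => PySem.List.pyGetD cs i ' ' :: (PySem.Int.toStr (pvCntA cs i)).toList) := by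
  induction l with
  | nil => simp
  | cons i t ih =>
    intro acc inc
    simp only [List.foldl_cons, List.flatMap_cons, pvStepA, ih]
    simp

-- the per-index pieces over range(len) are exactly pvPieces
theorem pv_flat_pieces (cs : List Char) :
    ((List.range cs.length).flatMap
      (fun k => cs.getD k ' ' :: (PySem.Int.toStr (((cs.drop (k + 1)).count (cs.getD k ' ') : Int) + 1)).toList))
      = (pvPieces cs).flatten := by
  induction cs with
  | nil => simp [pvPieces]
  | cons c t ih =>
    rw [List.length_cons, List.range_succ_eq_map]
    simp only [List.flatMap_cons, List.flatMap_map, List.getD_cons_zero,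
      List.getD_cons_succ, List.drop_succ_cons, List.drop_zero, pvPieces, List.flatten_cons, ih]

theorem pv_A_eq_pieces (cs : List Char) :
    ((PySem.List.pyRange 0 (cs.length : Int) 1).foldl (pvStepA cs) ([], 1)).1
      = (pvPieces cs).flatten := by
  rw [pv_foldA]
  rw [show ((cs.length : Int)) = ((cs.length : Nat) : Int) from rfl]
  rw [PySem.List.pyRange_zero_natCast]
  rw [List.flatMap_map]
  rw [← pv_flat_pieces]
  apply List.flatMap_congr
  intro k hk
  rw [PySem.List.pyGetD_natCast, pv_cntA_eq cs k (List.mem_range.mp hk)]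

-- B's dict after processing r holds the running counts of r
theorem pv_foldB_counts (r : List Char) :
    ∀ (d : PySem.Dict Char Int) (ps : List (List Char)) (x : Char),
      ((r.foldl pvStepB (d, ps)).1).getD x 0 = d.getD x 0 + (r.count x : Int) := by
  induction r with
  | nil => simp
  | cons y t ih =>
    intro d ps x
    simp only [List.foldl_cons, pvStepB, ih, List.count_cons]
    rcases eq_or_ne x y with h | h
    · rw [h, PySem.Dict.getD_insert_self]; simp; ring
    · rw [PySem.Dict.getD_insert_of_ne _ _ _ h]
      have : (y == x) = false := by simp [Ne.symm h]
      simp [this]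

-- B's whole pass produces the pieces, back to front
theorem pv_B_eq_pieces (cs : List Char) :
    (cs.reverse.foldl pvStepB (PySem.Dict.empty, [])).2.reverse.flatten = (pvPieces cs).flatten := by
  induction cs with
  | nil => simp [pvPieces]
  | cons c t ih =>
    rw [List.reverse_cons, List.foldl_append]
    simp only [List.foldl_cons, List.foldl_nil, pvStepB]
    rw [List.reverse_append]
    simp only [List.reverse_cons, List.reverse_nil, List.nil_append, List.flatten_cons,
      List.singleton_append]
    rw [pv_foldB_counts]
    simp only [pvPieces, List.flatten_cons]
    rw [ih]
    congr 2
    simp [List.count_reverse]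

-- ===== VERDICT (by name: the statement is the Claim_ definition above) =====
theorem freq_characters_spec : Claim_equal_freq_characters := by
  intro strng _
  unfold Spec_freq_characters freq_characters freq_characters_alt
  rw [pv_A_eq_pieces, pv_B_eq_pieces]
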